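-- pv_equiv track=rewrite | github.com/arockwell/emdx | emdx/ui/keybindings/registry.py | _are_actions_similar
-- ===== SOURCE A (Python) =====
-- def _are_actions_similar(action1: str, action2: str) -> bool:
--     """
--     Check if two actions are semantically similar.
--
--     Returns True if actions do essentially the same thing
--     (e.g., cursor_down vs scroll_down vs move_down).
--     """
--     # Normalize action names
--     a1 = action1.lower().replace("_", "").replace("-", "")
--     a2 = action2.lower().replace("_", "").replace("-", "")
--
--     # Direct match after normalization
--     if a1 == a2:
--         return True
--
--     # Common synonyms for navigation
--     synonyms = {
--         "cursordown": {"scrolldown", "movedown", "down"},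
--         "cursorup": {"scrollup", "moveup", "up"},
--         "cursorleft": {"scrollleft", "moveleft", "left"},
--         "cursorright": {"scrollright", "moveright", "right"},
--         "cursortop": {"scrolltop", "scrollhome", "home", "top"},
--         "cursorbottom": {"scrollbottom", "scrollend", "end", "bottom"},
--         "select": {"selectcursor", "zoomin", "enterdir"},
--         "home": {"cursorlinestart"},
--         "end": {"cursorlineend"},
--         # Text input synonyms
--         "cursorwordleft": {"cursorleftword"},
--         "cursorwordright": {"cursorrightword"},
--         "cursorwordleftselect": {"cursorleftwordselect", "cursorwordleft(true)"},
--         "cursorwordrightselect": {"cursorrighttwordselect", "cursorwordright(true)"},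
--         "cursorlinestartselect": {"hometrue", "home(true)"},
--         "cursorlineendselect": {"endtrue", "end(true)"},
--         "deletewordleft": {"deleteleftword"},
--         "deletewordright": {"deleterightword"},
--         "deletetostart": {"deleteleftall", "deletelefttostart"},
--         "deletetoend": {"deleterightall", "deleterighttoend"},
--     }
--
--     for canonical, variants in synonyms.items():
--         all_variants = variants | {canonical}
--         if a1 in all_variants and a2 in all_variants:
--             return True
--
--     return False
-- ===== SOURCE B (Python) =====
-- _GROUPS = [
--     ["cursordown", "scrolldown", "movedown", "down"],
--     ["cursorup", "scrollup", "moveup", "up"],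
--     ["cursorleft", "scrollleft", "moveleft", "left"],
--     ["cursorright", "scrollright", "moveright", "right"],
--     ["cursortop", "scrolltop", "scrollhome", "home", "top"],
--     ["cursorbottom", "scrollbottom", "scrollend", "end", "bottom"],
--     ["select", "selectcursor", "zoomin", "enterdir"],
--     ["home", "cursorlinestart"],
--     ["end", "cursorlineend"],
--     ["cursorwordleft", "cursorleftword"],
--     ["cursorwordright", "cursorrightword"],
--     ["cursorwordleftselect", "cursorleftwordselect", "cursorwordleft(true)"],
--     ["cursorwordrightselect", "cursorrighttwordselect", "cursorwordright(true)"],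
--     ["cursorlinestartselect", "hometrue", "home(true)"],
--     ["cursorlineendselect", "endtrue", "end(true)"],
--     ["deletewordleft", "deleteleftword"],
--     ["deletewordright", "deleterightword"],
--     ["deletetostart", "deleteleftall", "deletelefttostart"],
--     ["deletetoend", "deleterightall", "deleterighttoend"],
-- ]
--
-- _INDEX = {}
-- for _i, _group in enumerate(_GROUPS):
--     for _token in _group:
--         _INDEX.setdefault(_token, set()).add(_i)
--
--
-- def _are_actions_similar(action1: str, action2: str) -> bool:
--     """Inverted token->group-ids index; two actions are similar iff equal after
--     normalization or their tokens share a synonym group."""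
--     a1 = action1.lower().replace("_", "").replace("-", "")
--     a2 = action2.lower().replace("_", "").replace("-", "")
--     if a1 == a2:
--         return True
--     return bool(_INDEX.get(a1, set()) & _INDEX.get(a2, set()))
-- ===== Notes on version B (the rewrite author's own statement) =====
-- stated objective: alternative
-- what changed: Replaces the per-call scan over all synonym groups by a precomputed inverted index mapping each token to the set of group ids, answering with a single lookup of each normalized name and a set intersection.
import Mathlib
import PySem

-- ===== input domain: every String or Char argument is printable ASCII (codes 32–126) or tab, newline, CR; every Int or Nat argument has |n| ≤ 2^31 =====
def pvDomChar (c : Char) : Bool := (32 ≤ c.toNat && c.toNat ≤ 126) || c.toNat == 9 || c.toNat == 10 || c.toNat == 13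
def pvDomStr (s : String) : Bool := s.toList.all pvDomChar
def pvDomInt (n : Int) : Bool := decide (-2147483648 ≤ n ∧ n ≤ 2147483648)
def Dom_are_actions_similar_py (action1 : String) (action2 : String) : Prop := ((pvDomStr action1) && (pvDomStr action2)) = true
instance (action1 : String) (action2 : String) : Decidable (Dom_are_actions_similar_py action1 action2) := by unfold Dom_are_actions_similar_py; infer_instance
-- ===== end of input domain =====

-- B replaces A's per-group scan by a precomputed inverted token→group-ids index and a
-- lookup-and-intersect; objective: alternative (different data structure), same observable results.

-- ===== PORT A =====
def pvNorm (s : String) : String :=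
  PySem.Str.replace (PySem.Str.replace (PySem.Str.lower s) "_" "") "-" ""

def pvSynonyms : List (String × PySem.Set String) :=
  [("cursordown", PySem.Set.ofList ["scrolldown", "movedown", "down"]),
   ("cursorup", PySem.Set.ofList ["scrollup", "moveup", "up"]),
   ("cursorleft", PySem.Set.ofList ["scrollleft", "moveleft", "left"]),
   ("cursorright", PySem.Set.ofList ["scrollright", "moveright", "right"]),
   ("cursortop", PySem.Set.ofList ["scrolltop", "scrollhome", "home", "top"]),
   ("cursorbottom", PySem.Set.ofList ["scrollbottom", "scrollend", "end", "bottom"]),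
   ("select", PySem.Set.ofList ["selectcursor", "zoomin", "enterdir"]),
   ("home", PySem.Set.ofList ["cursorlinestart"]),
   ("end", PySem.Set.ofList ["cursorlineend"]),
   ("cursorwordleft", PySem.Set.ofList ["cursorleftword"]),
   ("cursorwordright", PySem.Set.ofList ["cursorrightword"]),
   ("cursorwordleftselect", PySem.Set.ofList ["cursorleftwordselect", "cursorwordleft(true)"]),
   ("cursorwordrightselect", PySem.Set.ofList ["cursorrighttwordselect", "cursorwordright(true)"]),
   ("cursorlinestartselect", PySem.Set.ofList ["hometrue", "home(true)"]),
   ("cursorlineendselect", PySem.Set.ofList ["endtrue", "end(true)"]),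
   ("deletewordleft", PySem.Set.ofList ["deleteleftword"]),
   ("deletewordright", PySem.Set.ofList ["deleterightword"]),
   ("deletetostart", PySem.Set.ofList ["deleteleftall", "deletelefttostart"]),
   ("deletetoend", PySem.Set.ofList ["deleterightall", "deleterighttoend"])]

-- the loop 'for canonical, variants in synonyms.items(): … return True / return False'
def pvLoopA (a1 a2 : String) : Bool :=
  pvSynonyms.any (fun p =>
    let allVariants := PySem.Set.union p.2 (PySem.Set.ofList [p.1])
    PySem.Set.contains allVariants a1 && PySem.Set.contains allVariants a2)

def are_actions_similar_py (action1 : String) (action2 : String) : Bool :=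
  let a1 := pvNorm action1
  let a2 := pvNorm action2
  if a1 == a2 then true
  else pvLoopA a1 a2

-- ===== PORT B =====
def pvGroups : List (List String) :=
  [["cursordown", "scrolldown", "movedown", "down"],
   ["cursorup", "scrollup", "moveup", "up"],
   ["cursorleft", "scrollleft", "moveleft", "left"],
   ["cursorright", "scrollright", "moveright", "right"],
   ["cursortop", "scrolltop", "scrollhome", "home", "top"],
   ["cursorbottom", "scrollbottom", "scrollend", "end", "bottom"],
   ["select", "selectcursor", "zoomin", "enterdir"],
   ["home", "cursorlinestart"],
   ["end", "cursorlineend"],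
   ["cursorwordleft", "cursorleftword"],
   ["cursorwordright", "cursorrightword"],
   ["cursorwordleftselect", "cursorleftwordselect", "cursorwordleft(true)"],
   ["cursorwordrightselect", "cursorrighttwordselect", "cursorwordright(true)"],
   ["cursorlinestartselect", "hometrue", "home(true)"],
   ["cursorlineendselect", "endtrue", "end(true)"],
   ["deletewordleft", "deleteleftword"],
   ["deletewordright", "deleterightword"],
   ["deletetostart", "deleteleftall", "deletelefttostart"],
   ["deletetoend", "deleterightall", "deleterighttoend"]]

-- _INDEX: for i, group in enumerate(_GROUPS): for token in group: _INDEX.setdefault(token, set()).add(i)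
def pvIndex : PySem.Dict String (PySem.Set Int) :=
  (PySem.List.enumerate pvGroups).foldl
    (fun d p => p.2.foldl
      (fun d t => d.modify t PySem.Set.empty (fun s => PySem.Set.add s p.1)) d)
    PySem.Dict.empty

def are_actions_similar_py_alt (action1 : String) (action2 : String) : Bool :=
  let a1 := pvNorm action1
  let a2 := pvNorm action2
  if a1 == a2 then true
  else !(PySem.Set.inter (pvIndex.getD a1 PySem.Set.empty)
           (pvIndex.getD a2 PySem.Set.empty)).isEmpty

-- ===== PRECONDITION & SPEC =====
def Spec_are_actions_similar_py (action1 : String) (action2 : String) (out : Bool) : Prop := out = are_actions_similar_py_alt action1 action2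
instance (action1 : String) (action2 : String) (out : Bool) : Decidable (Spec_are_actions_similar_py action1 action2 out) := by unfold Spec_are_actions_similar_py; infer_instance

-- ===== CLAIM (what is proved, stated in full; the proofs are below) =====
def Claim_equal_are_actions_similar_py : Prop := ∀ (action1 : String) (action2 : String), Dom_are_actions_similar_py action1 action2 → Spec_are_actions_similar_py action1 action2 (are_actions_similar_py action1 action2)

-- ===== LEMMAS AND PROOFS =====

-- all tokens of all groups, with duplicates
def pvTok : List String := pvGroups.flatten

def pvLookupB (a1 a2 : String) : Bool :=
  !(PySem.Set.inter (pvIndex.getD a1 PySem.Set.empty)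
      (pvIndex.getD a2 PySem.Set.empty)).isEmpty

-- every token mentioned by A's synonym table is in pvTok
theorem pvSyn_sub :
    (pvSynonyms.all (fun p =>
      (PySem.Set.union p.2 (PySem.Set.ofList [p.1])).all (fun t => pvTok.contains t))) = true := by
  decide

-- every key of the index is in pvTok
set_option maxRecDepth 100000 in
theorem pvIndex_keys_sub : (pvIndex.keys.all (fun t => pvTok.contains t)) = true := by
  decide

-- the two cores agree on every pair of tokens
set_option maxRecDepth 100000 in
set_option maxHeartbeats 2000000 in
theorem pvTok_agree :
    (pvTok.all (fun x => pvTok.all (fun y => pvLoopA x y == pvLookupB x y))) = true := by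
  decide

theorem pvLoopA_false_left {x : String} (hx : x ∉ pvTok) (y : String) :
    pvLoopA x y = false := by
  rw [pvLoopA, List.any_eq_false]
  intro p hp
  have h := (List.all_eq_true.mp pvSyn_sub) p hp
  simp only [List.all_eq_true, List.contains_eq_mem, decide_eq_true_eq] at h
  intro hcontra
  simp only [Bool.and_eq_true] at hcontra
  have hmx : x ∈ PySem.Set.union p.2 (PySem.Set.ofList [p.1]) := by
    simpa [PySem.Set.contains] using hcontra.1
  exact hx (h x hmx)

theorem pvLoopA_false_right {y : String} (hy : y ∉ pvTok) (x : String) :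
    pvLoopA x y = false := by
  rw [pvLoopA, List.any_eq_false]
  intro p hp
  have h := (List.all_eq_true.mp pvSyn_sub) p hp
  simp only [List.all_eq_true, List.contains_eq_mem, decide_eq_true_eq] at h
  intro hcontra
  simp only [Bool.and_eq_true] at hcontra
  have hmy : y ∈ PySem.Set.union p.2 (PySem.Set.ofList [p.1]) := by
    simpa [PySem.Set.contains] using hcontra.2
  exact hy (h y hmy)

theorem pvIndex_getD_not_tok {x : String} (hx : x ∉ pvTok) :
    pvIndex.getD x PySem.Set.empty = PySem.Set.empty := by
  apply PySem.Dict.getD_of_not_contains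
  rw [PySem.Dict.contains_eq_decide_mem_keys]
  simp only [decide_eq_false_iff_not]
  intro hk
  have h := (List.all_eq_true.mp pvIndex_keys_sub) x hk
  simp only [List.contains_eq_mem, decide_eq_true_eq] at h
  exact hx h

theorem pvInter_empty_left (t : PySem.Set Int) :
    PySem.Set.inter (PySem.Set.empty : PySem.Set Int) t = PySem.Set.empty := by
  simp [PySem.Set.inter, PySem.Set.empty]

theorem pvInter_empty_right (s : PySem.Set Int) :
    PySem.Set.inter s (PySem.Set.empty : PySem.Set Int) = PySem.Set.empty := by
  simp [PySem.Set.inter, PySem.Set.empty]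

theorem pvCore_agree (x y : String) : pvLoopA x y = pvLookupB x y := by
  by_cases hx : x ∈ pvTok
  · by_cases hy : y ∈ pvTok
    · have h1 := (List.all_eq_true.mp pvTok_agree) x hx
      have h2 := (List.all_eq_true.mp h1) y hy
      exact of_decide_eq_true h2
    · rw [pvLoopA_false_right hy, pvLookupB, pvIndex_getD_not_tok hy, pvInter_empty_right]
      rfl
  · rw [pvLoopA_false_left hx, pvLookupB, pvIndex_getD_not_tok hx, pvInter_empty_left]
    rfl

-- ===== VERDICT (by name: the statement is the Claim_ definition above) =====
theorem are_actions_similar_py_spec : Claim_equal_are_actions_similar_py := by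
  intro action1 action2 _
  unfold Spec_are_actions_similar_py are_actions_similar_py are_actions_similar_py_alt
  by_cases h : pvNorm action1 == pvNorm action2
  · simp [h]
  · simp only [h]
    simp only [Bool.false_eq_true, if_false]
    exact pvCore_agree _ _
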